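-- pv_equiv track=rewrite | github.com/daniel-reich/ubiquitous-fiesta | WH8AfHodqyj4gSB8K_15.py | is_authentic_skewer
-- ===== SOURCE A (Python) =====
-- def is_authentic_skewer(mix):
--     '''
--     Returns True if mix is a consistent set of vowel - space(s) - consonants
--     as per the instructions
--     '''
--     CONSONANTS = set('BCDFGHJKLMNPQRSTVWXYZ')
--     VOWELS = set('AEIOU')
--
--     size = len(mix)
--     pattern = ''.join(['C' if c in CONSONANTS else 'V' if c in VOWELS else c
--                        for c in mix])  # pattern of consonants, vowels etc
--     if size < 5 or pattern[0] != 'C' or pattern[1] != '-':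
--         return False
--
--     count = 0
--     i = 1
--     while pattern[i] == '-':
--         count += 1  # size of 1st skewer space
--         i += 1
--
--     num = size // (2 * (count + 1))  # number of c - v -  sets expected
--     legit_set = 'C' + '-' * count + 'V' + '-' * count
--
--     return pattern == legit_set * num + 'C'
-- ===== SOURCE B (Python) =====
-- def is_authentic_skewer(mix):
--     CONSONANTS = set('BCDFGHJKLMNPQRSTVWXYZ')
--     VOWELS = set('AEIOU')
--     size = len(mix)
--     if size < 5 or mix[0] not in CONSONANTS or mix[1] != '-':
--         return False
--     count = 0
--     i = 1
--     while mix[i] == '-':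
--         count += 1
--         i += 1
--     unit = 2 * (count + 1)
--     num = size // unit
--     if size != num * unit + 1:
--         return False
--     for i in range(size - 1):
--         r = i % unit
--         if r == 0:
--             ok = mix[i] in CONSONANTS
--         elif r == count + 1:
--             ok = mix[i] in VOWELS
--         else:
--             ok = mix[i] == '-'
--         if not ok:
--             return False
--     return mix[size - 1] in CONSONANTS
-- ===== Notes on version B (the rewrite author's own statement) =====
-- stated objective: faster
-- what changed: B validates the skewer positionally in one pass with index arithmetic (i % unit selects whether a position must hold a consonant, a vowel or a dash) and exits at the first mismatch, instead of materialising the full canonical pattern string and the expected repeated block string and comparing them; Pre_ excludes only the inputs (length >= 5, leading consonant followed solely by dashes) on which both A and B raise IndexError in the unguarded while loop.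
import Mathlib
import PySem

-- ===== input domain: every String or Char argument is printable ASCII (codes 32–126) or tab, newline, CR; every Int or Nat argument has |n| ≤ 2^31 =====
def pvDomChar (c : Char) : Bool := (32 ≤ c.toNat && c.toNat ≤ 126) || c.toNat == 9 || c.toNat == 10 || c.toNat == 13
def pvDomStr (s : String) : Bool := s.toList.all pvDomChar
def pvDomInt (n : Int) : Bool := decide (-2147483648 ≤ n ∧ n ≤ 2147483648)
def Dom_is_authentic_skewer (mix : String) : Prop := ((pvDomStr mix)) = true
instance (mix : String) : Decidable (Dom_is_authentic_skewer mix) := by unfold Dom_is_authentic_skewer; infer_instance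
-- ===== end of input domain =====

-- B validates positionally in one pass using index arithmetic (i % unit) instead of
-- building the canonical pattern string and the expected repeated string and comparing.

-- ===== PORT A =====
-- set('BCDFGHJKLMNPQRSTVWXYZ') / set('AEIOU') as literal element lists
def pvConsA : List Char :=
  ['B','C','D','F','G','H','J','K','L','M','N','P','Q','R','S','T','V','W','X','Y','Z']
def pvVowsA : List Char := ['A','E','I','O','U']

-- the comprehension body: 'C' if c in CONSONANTS else 'V' if c in VOWELS else c
def patChar (c : Char) : Char :=
  if c ∈ pvConsA then 'C' else if c ∈ pvVowsA then 'V' else c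

-- legit_set = 'C' + '-' * count + 'V' + '-' * count
def legitL (count : Nat) : List Char :=
  'C' :: (List.replicate count '-' ++ 'V' :: List.replicate count '-')

-- the unguarded `while pattern[i] == '-'` loop; none = the IndexError excluded by Pre_
def countDashA (pattern : List Char) : Nat → Nat → Nat → Option Nat
  | _, _, 0 => none
  | i, count, fuel+1 =>
    match pattern[i]? with
    | none => none
    | some ch => if ch = '-' then countDashA pattern (i+1) (count+1) fuel else some count

def is_authentic_skewer (mix : String) : Bool :=
  let l := mix.toList
  let size := l.length
  let pattern := l.map patChar
  if size < 5 then false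
  else if pattern.getD 0 ' ' ≠ 'C' then false
  else if pattern.getD 1 ' ' ≠ '-' then false
  else
    match countDashA pattern 1 0 size with
    | none => false
    | some count =>
      let num := size / (2 * (count + 1))
      pattern == (List.replicate num (legitL count)).flatten ++ ['C']

-- ===== PORT B =====
def countDashB (l : List Char) : Nat → Nat → Nat → Option Nat
  | _, _, 0 => none
  | i, count, fuel+1 =>
    match l[i]? with
    | none => none
    | some ch => if ch = '-' then countDashB l (i+1) (count+1) fuel else some count

def is_authentic_skewer_alt (mix : String) : Bool :=
  let l := mix.toList
  let size := l.length
  if size < 5 then false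
  else if ¬ (l.getD 0 ' ' ∈ pvConsA) then false
  else if l.getD 1 ' ' ≠ '-' then false
  else
    match countDashB l 1 0 size with
    | none => false
    | some count =>
      let unit := 2 * (count + 1)
      let num := size / unit
      if size ≠ num * unit + 1 then false
      else
        ((List.range (size - 1)).all fun i =>
          if i % unit = 0 then decide (l.getD i ' ' ∈ pvConsA)
          else if i % unit = count + 1 then decide (l.getD i ' ' ∈ pvVowsA)
          else decide (l.getD i ' ' = '-')) &&
        decide (l.getD (size - 1) ' ' ∈ pvConsA)

-- ===== PRECONDITION & SPEC =====
-- Pre_ excludes exactly the inputs where A's unguarded while loop runs off the end of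
-- the string (length ≥ 5, a leading consonant followed only by dashes) and raises IndexError.
def Pre_is_authentic_skewer (mix : String) : Prop :=
  ¬ (5 ≤ mix.toList.length ∧ pvConsA.contains (mix.toList.getD 0 ' ') = true ∧
      (mix.toList.drop 1).all (· == '-') = true)
instance (mix : String) : Decidable (Pre_is_authentic_skewer mix) := by
  unfold Pre_is_authentic_skewer; infer_instance

def pvWitness_is_authentic_skewer : String := "B-A-B"

def Spec_is_authentic_skewer (mix : String) (out : Bool) : Prop := out = is_authentic_skewer_alt mix
instance (mix : String) (out : Bool) : Decidable (Spec_is_authentic_skewer mix out) := by unfold Spec_is_authentic_skewer; infer_instance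

-- ===== CLAIM (what is proved, stated in full; the proofs are below) =====
def Claim_equal_is_authentic_skewer : Prop := ∀ (mix : String), Dom_is_authentic_skewer mix → Pre_is_authentic_skewer mix → Spec_is_authentic_skewer mix (is_authentic_skewer mix)

-- ===== LEMMAS AND PROOFS =====

theorem patChar_dash (c : Char) : patChar c = '-' ↔ c = '-' := by
  unfold patChar; split_ifs with h1 h2
  · constructor
    · intro h; exact absurd h (by decide)
    · rintro rfl; exact absurd h1 (by decide)
  · constructor
    · intro h; exact absurd h (by decide)
    · rintro rfl; exact absurd h2 (by decide)
  · exact Iff.rfl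

theorem patChar_C (c : Char) : patChar c = 'C' ↔ c ∈ pvConsA := by
  unfold patChar; split_ifs with h1 h2
  · simp [h1]
  · simp [h1]
  · constructor
    · rintro rfl; exact absurd (by decide) h1
    · intro h; exact absurd h h1

theorem patChar_V (c : Char) : patChar c = 'V' ↔ c ∈ pvVowsA := by
  unfold patChar; split_ifs with h1 h2
  · constructor
    · intro h; exact absurd h (by decide)
    · intro h; fin_cases h1 <;> revert h <;> decide
  · simp [h2]
  · constructor
    · rintro rfl; exact absurd (show ('V':Char) ∈ pvConsA by decide) h1
    · intro h; exact absurd h h2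



theorem countDash_AB (l : List Char) (f : Nat) : ∀ i c,
    countDashA (l.map patChar) i c f = countDashB l i c f := by
  induction f with
  | zero => intro i c; rfl
  | succ f ih =>
    intro i c
    simp only [countDashA, countDashB, List.getElem?_map]
    cases h : l[i]? with
    | none => rfl
    | some ch =>
      simp only [Option.map_some]
      by_cases hd : ch = '-'
      · subst hd; simp [patChar_dash, ih]
      · simp [hd, (patChar_dash ch).not.mpr hd]


theorem legit_len (count : Nat) : (legitL count).length = 2 * (count + 1) := by
  simp [legitL]; omega

theorem rep_len (L : List Char) (n : Nat) :
    ((List.replicate n L).flatten).length = n * L.length := by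
  induction n with
  | zero => simp
  | succ n ih => simp [List.replicate_succ, ih]; ring

theorem rep_get (L : List Char) (n : Nat) : ∀ i, i < n * L.length →
    ((List.replicate n L).flatten)[i]? = L[i % L.length]? := by
  induction n with
  | zero => intro i h; omega
  | succ n ih =>
    intro i h
    have hstep : (n + 1) * L.length = n * L.length + L.length := by ring
    rw [hstep] at h
    rw [List.replicate_succ, List.flatten_cons]
    by_cases hi : i < L.length
    · rw [List.getElem?_append_left hi, Nat.mod_eq_of_lt hi]
    · push_neg at hi
      rw [List.getElem?_append_right hi, ih (i - L.length) (by omega),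
        Nat.mod_eq_sub_mod hi]

theorem legit_get (count : Nat) : ∀ r, r < 2 * (count + 1) →
    (legitL count)[r]? = some (if r = 0 then 'C' else if r = count + 1 then 'V' else '-') := by
  intro r hr
  match r with
  | 0 => rfl
  | r+1 =>
    simp only [legitL, List.getElem?_cons_succ]
    by_cases h1 : r < count
    · rw [List.getElem?_append_left (by simpa using h1)]
      simp [List.getElem?_replicate, h1]; omega
    · push_neg at h1
      rw [List.getElem?_append_right (by simpa using h1)]
      simp only [List.length_replicate]
      by_cases h2 : r = count
      · subst h2; simp
      · have : r - count = (r - count - 1) + 1 := by omega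
        rw [this, List.getElem?_cons_succ]
        simp [List.getElem?_replicate]
        constructor
        · omega
        · intro h; omega

theorem central (l : List Char) (count : Nat) :
    (l.map patChar == (List.replicate (l.length / (2 * (count + 1))) (legitL count)).flatten ++ ['C'])
  = (if l.length ≠ l.length / (2 * (count + 1)) * (2 * (count + 1)) + 1 then false
     else ((List.range (l.length - 1)).all fun i =>
             if i % (2 * (count + 1)) = 0 then decide (l.getD i ' ' ∈ pvConsA)
             else if i % (2 * (count + 1)) = count + 1 then decide (l.getD i ' ' ∈ pvVowsA)
             else decide (l.getD i ' ' = '-')) &&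
          decide (l.getD (l.length - 1) ' ' ∈ pvConsA)) := by
  have hU : 0 < 2 * (count + 1) := by omega
  have hreplen : ((List.replicate (l.length / (2 * (count + 1))) (legitL count)).flatten).length
      = (l.length / (2 * (count + 1))) * (2 * (count + 1)) := by
    rw [rep_len, legit_len]
  set U := 2 * (count + 1) with hUdef
  set num := l.length / U with hnumdef
  by_cases hs : l.length = num * U + 1
  · rw [if_neg (by omega)]
    rw [Bool.eq_iff_iff, beq_iff_eq, Bool.and_eq_true, List.all_eq_true]
    have hlast_idx : l.length - 1 = num * U := by omega
    constructor
    · intro h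
      constructor
      · intro i hi
        rw [List.mem_range] at hi
        have hiU : i < num * U := by omega
        have hil : i < l.length := by omega
        have hrU : i % U < U := Nat.mod_lt _ hU
        have hrhs : ((List.replicate num (legitL count)).flatten ++ ['C'])[i]?
            = some (if i % U = 0 then 'C' else if i % U = count + 1 then 'V' else '-') := by
          rw [List.getElem?_append_left (by rw [hreplen]; exact hiU),
            rep_get _ _ _ (by rw [legit_len]; exact hiU), legit_len,
            legit_get _ _ hrU]
        have hlhs : (l.map patChar)[i]? = some (patChar (l[i]'hil)) := by
          simp [List.getElem?_map, List.getElem?_eq_getElem hil]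
        rw [h, hrhs] at hlhs
        have hgd : l.getD i ' ' = l[i]'hil := List.getD_eq_getElem l ' ' hil
        simp only [Option.some.injEq] at hlhs
        show (if i % U = 0 then decide (l.getD i ' ' ∈ pvConsA)
              else if i % U = count + 1 then decide (l.getD i ' ' ∈ pvVowsA)
              else decide (l.getD i ' ' = '-')) = true
        by_cases h0 : i % U = 0
        · rw [if_pos h0] at hlhs ⊢
          rw [decide_eq_true_eq, hgd, ← patChar_C]
          exact hlhs.symm
        · by_cases h1 : i % U = count + 1
          · rw [if_neg h0, if_pos h1] at hlhs ⊢
            rw [decide_eq_true_eq, hgd, ← patChar_V]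
            exact hlhs.symm
          · rw [if_neg h0, if_neg h1] at hlhs ⊢
            rw [decide_eq_true_eq, hgd, ← patChar_dash]
            exact hlhs.symm
      · have hil : num * U < l.length := by omega
        have hrhs : ((List.replicate num (legitL count)).flatten ++ ['C'])[num * U]?
            = some 'C' := by
          rw [List.getElem?_append_right (by rw [hreplen])]
          rw [hreplen, Nat.sub_self]
          rfl
        have hlhs : (l.map patChar)[num * U]? = some (patChar (l[num * U]'hil)) := by
          simp [List.getElem?_map, List.getElem?_eq_getElem hil]
        rw [h, hrhs] at hlhs
        simp only [Option.some.injEq] at hlhs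
        have hgd : l.getD (l.length - 1) ' ' = l[num * U]'hil := by
          rw [hlast_idx]; exact List.getD_eq_getElem l ' ' hil
        rw [decide_eq_true_eq, hgd, ← patChar_C]
        exact hlhs.symm
    · rintro ⟨hall, hlast⟩
      apply List.ext_getElem?
      intro i
      by_cases hiU : i < num * U
      · have hil : i < l.length := by omega
        have hrU : i % U < U := Nat.mod_lt _ hU
        rw [List.getElem?_append_left (by rw [hreplen]; exact hiU),
          rep_get _ _ _ (by rw [legit_len]; exact hiU), legit_len,
          legit_get _ _ hrU]
        simp only [List.getElem?_map, List.getElem?_eq_getElem hil, Option.map_some,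
          Option.some.injEq]
        have hmem := hall i (List.mem_range.mpr (by omega))
        have hgd : l.getD i ' ' = l[i]'hil := List.getD_eq_getElem l ' ' hil
        by_cases h0 : i % U = 0
        · rw [if_pos h0]
          rw [if_pos h0, hgd] at hmem
          rw [patChar_C]; simpa using hmem
        · by_cases h1 : i % U = count + 1
          · rw [if_neg h0, if_pos h1]
            rw [if_neg h0, if_pos h1, hgd] at hmem
            rw [patChar_V]; simpa using hmem
          · rw [if_neg h0, if_neg h1]
            rw [if_neg h0, if_neg h1, hgd] at hmem
            rw [patChar_dash]; simpa using hmem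
      · by_cases hieq : i = num * U
        · subst hieq
          have hil : num * U < l.length := by omega
          rw [List.getElem?_append_right (by rw [hreplen])]
          simp only [hreplen, Nat.sub_self]
          have hgd : l.getD (l.length - 1) ' ' = l[num * U]'hil := by
            rw [hlast_idx]; exact List.getD_eq_getElem l ' ' hil
          simp only [List.getElem?_map, List.getElem?_eq_getElem hil, Option.map_some]
          rw [hgd] at hlast
          simp only [List.getElem?_cons_zero, Option.some.injEq]
          rw [patChar_C]; simpa using hlast
        · have hge : l.length ≤ i := by omega
          rw [List.getElem?_eq_none (by simpa using hge),
            List.getElem?_eq_none (by simp [hreplen]; omega)]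
  · rw [if_pos hs]
    rw [Bool.eq_iff_iff, beq_iff_eq]
    simp only [Bool.false_eq_true, iff_false]
    intro h
    have := congrArg List.length h
    simp only [List.length_map, List.length_append, hreplen, List.length_cons,
      List.length_nil] at this
    omega

theorem main_eq (mix : String) : is_authentic_skewer mix = is_authentic_skewer_alt mix := by
  unfold is_authentic_skewer is_authentic_skewer_alt
  set l := mix.toList with hl
  by_cases h5 : l.length < 5
  · simp only [if_pos h5]
  · have h0 : 0 < l.length := by omega
    have h1 : 1 < l.length := by omega
    have hm0 : (l.map patChar).getD 0 ' ' = patChar (l[0]'h0) := by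
      rw [List.getD_eq_getElem _ _ (by simpa using h0), List.getElem_map]
    have hm1 : (l.map patChar).getD 1 ' ' = patChar (l[1]'h1) := by
      rw [List.getD_eq_getElem _ _ (by simpa using h1), List.getElem_map]
    have hg0 : l.getD 0 ' ' = l[0]'h0 := List.getD_eq_getElem l ' ' h0
    have hg1 : l.getD 1 ' ' = l[1]'h1 := List.getD_eq_getElem l ' ' h1
    have e0 : ((l.map patChar).getD 0 ' ' ≠ 'C') ↔ ¬ (l.getD 0 ' ' ∈ pvConsA) := by
      rw [hm0, hg0]; exact not_congr (patChar_C _)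
    have e1 : ((l.map patChar).getD 1 ' ' ≠ '-') ↔ (l.getD 1 ' ' ≠ '-') := by
      rw [hm1, hg1]; exact not_congr (patChar_dash _)
    simp only [if_neg h5, e0, e1, countDash_AB]
    by_cases hc0 : l.getD 0 ' ' ∈ pvConsA
    · rw [if_neg (not_not_intro hc0), if_neg (not_not_intro hc0)]
      by_cases hc1 : l.getD 1 ' ' = '-'
      · rw [if_neg (not_not_intro hc1), if_neg (not_not_intro hc1)]
        cases hcd : countDashB l 1 0 l.length with
        | none => rfl
        | some count => exact central l count
      · rw [if_pos hc1, if_pos hc1]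
    · rw [if_pos hc0, if_pos hc0]

-- ===== VERDICT (by name: the statement is the Claim_ definition above) =====
theorem is_authentic_skewer_spec : Claim_equal_is_authentic_skewer := by
  intro mix _ _
  exact (main_eq mix).symm ▸ rfl
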